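-- pv_equiv track=rewrite | github.com/RajChak93/PythonScripts | aggregate_on_chr_start_end.py | create_groupby
-- ===== SOURCE A (Python) =====
-- from typing import List
-- from typing import Dict
--
-- def create_groupby(table: List[List[str]]) -> Dict[str, str]:
--     groupby_dict = {}
--     for row in table:
--         assert (len(row) == 4)
--         transcription, chr, start, end = row
--         key = chr + ',' + start + ',' + end
--         if key in groupby_dict:
--             groupby_dict[key] = groupby_dict[key] + ',' + transcription
--         else:
--             groupby_dict[key] = transcription
--     return groupby_dict
-- ===== SOURCE B (Python) =====
-- def create_groupby(table):
--     # Validate every row first, in the original iteration order (same AssertionError timing as A).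
--     for row in table:
--         assert (len(row) == 4)
--     # Staged algorithm with no incremental grouping structure: compute the key of every row,
--     # list the distinct keys in first-occurrence order, and for each distinct key scan the
--     # table collecting its transcriptions and join them once.
--     keys = [row[1] + ',' + row[2] + ',' + row[3] for row in table]
--     return {k: ','.join(row[0] for row, kk in zip(table, keys) if kk == k)
--             for k in dict.fromkeys(keys)}
-- ===== Notes on version B (the rewrite author's own statement) =====
-- stated objective: alternative
-- what changed: B replaces A's single-pass dict accumulation by a staged, dict-free algorithm: it validates all rows, computes the key of every row, deduplicates the keys to their first-occurrence order, and builds each output value by one per-key scan of the table joined with ',' once.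
import Mathlib
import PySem

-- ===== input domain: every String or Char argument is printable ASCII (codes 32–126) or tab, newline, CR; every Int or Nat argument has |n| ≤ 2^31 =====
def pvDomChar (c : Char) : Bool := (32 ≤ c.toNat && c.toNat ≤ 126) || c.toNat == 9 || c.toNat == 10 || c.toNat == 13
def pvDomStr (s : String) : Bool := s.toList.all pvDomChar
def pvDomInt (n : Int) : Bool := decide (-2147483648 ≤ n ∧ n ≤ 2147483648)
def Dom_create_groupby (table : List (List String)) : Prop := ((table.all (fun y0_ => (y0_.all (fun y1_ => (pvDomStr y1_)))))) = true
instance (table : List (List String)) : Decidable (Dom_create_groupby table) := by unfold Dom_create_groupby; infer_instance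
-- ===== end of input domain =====

-- B is a staged, dict-free re-implementation: validate all rows, dedup the per-row keys in
-- first-occurrence order, then one per-key scan of the table joined with ',' once.


-- ===== PORT A =====
-- one step of A's loop; rows of length ≠ 4 hit A's assert (excluded by Pre_), the port skips them
def pvStepA (d : PySem.Dict String String) (row : List String) : PySem.Dict String String :=
  match row with
  | [transcription, chr, start, «end»] =>
    let key := chr ++ "," ++ start ++ "," ++ «end»
    match d.get? key with
    | some v => d.insert key (v ++ "," ++ transcription)
    | none => d.insert key transcription
  | _ => d

def create_groupby (table : List (List String)) : List (String × String) :=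
  (table.foldl pvStepA PySem.Dict.empty).items

-- ===== PORT B =====
-- key of a row (rows have length 4 under Pre_; shorter rows never reach this in B)
def pvKeyB (row : List String) : String :=
  match row with
  | _ :: chr :: start :: «end» :: _ => chr ++ "," ++ start ++ "," ++ «end»
  | _ => ""

def create_groupby_alt (table : List (List String)) : List (String × String) :=
  -- B's validation loop: any bad row raises (outside Pre_); the port guards the whole body
  if table.all (fun row => row.length == 4) then
    let keys := table.map pvKeyB
    -- dict.fromkeys(keys) = PySem.List.dedup keys; per distinct key one scan of zip(table, keys)
    (PySem.List.dedup keys).map (fun k =>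
      (k, PySem.Str.join ","
            ((table.zip keys).filterMap
              (fun p => if p.2 == k then some (p.1.headD "") else none))))
  else []

-- ===== PRECONDITION & SPEC =====
-- Pre_ excludes exactly the inputs on which A's `assert len(row) == 4` raises AssertionError.
def Pre_create_groupby (table : List (List String)) : Prop :=
  ∀ row ∈ table, row.length = 4
instance (table : List (List String)) : Decidable (Pre_create_groupby table) := by
  unfold Pre_create_groupby; infer_instance
def pvWitness_create_groupby : List (List String) :=
  [["t1", "chr1", "5", "9"], ["t2", "chr1", "5", "9"], ["t3", "chr2", "1", "2"]]
def Spec_create_groupby (table : List (List String)) (out : List (String × String)) : Prop := out = create_groupby_alt table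
instance (table : List (List String)) (out : List (String × String)) : Decidable (Spec_create_groupby table out) := by unfold Spec_create_groupby; infer_instance

-- ===== CLAIM (what is proved, stated in full; the proofs are below) =====
def Claim_equal_create_groupby : Prop := ∀ (table : List (List String)), Dom_create_groupby table → Pre_create_groupby table → Spec_create_groupby table (create_groupby table)

-- ===== LEMMAS AND PROOFS =====

-- transcriptions of the rows of `rows` whose key is k, in order
def pvTs (rows : List (List String)) (k : String) : List String :=
  rows.filterMap (fun r => if pvKeyB r == k then some (r.headD "") else none)

theorem pvIntercalate_snoc (sep a t : List Char) (ts : List (List Char)) :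
    sep.intercalate (a :: (ts ++ [t])) = sep.intercalate (a :: ts) ++ sep ++ t := by
  induction ts generalizing a with
  | nil => simp [List.intercalate]
  | cons b ts ih => simp [List.intercalate] at ih ⊢; simp [ih]

theorem pvJoin_snoc (sep t a : String) (ts : List String) :
    PySem.Str.join sep (a :: (ts ++ [t])) = PySem.Str.join sep (a :: ts) ++ sep ++ t := by
  apply String.toList_inj.mp
  simp only [PySem.Str.join, PySem.Chars.join, String.toList_ofList, String.toList_append,
    List.map_cons, List.map_append, List.map_nil]
  exact pvIntercalate_snoc _ _ _ _

theorem pvJoin_singleton (sep t : String) : PySem.Str.join sep [t] = t := by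
  apply String.toList_inj.mp
  simp [PySem.Str.join, PySem.Chars.join, List.intercalate]

-- get? of the dict whose items are built by mapping a value function over a key list
theorem pvGet?_mkMap (dist : List String) (f : String → String) (x : String) :
    (PySem.Dict.mk (dist.map (fun k => (k, f k)))).get? x
      = if x ∈ dist then some (f x) else none := by
  induction dist with
  | nil => simp [PySem.Dict.get?]
  | cons a rest ih =>
    rw [List.map_cons, PySem.Dict.get?_mk_cons]
    by_cases h : a = x
    · subst h; simp
    · simp [h, Ne.symm h, ih]

theorem pvTs_snoc (rows : List (List String)) (r : List String) (k : String) :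
    pvTs (rows ++ [r]) k
      = pvTs rows k ++ (if pvKeyB r == k then [r.headD ""] else []) := by
  simp only [pvTs, List.filterMap_append, List.filterMap_cons, List.filterMap_nil]
  split <;> simp_all

theorem pvTs_ne_nil (rows : List (List String)) (k : String)
    (h : k ∈ rows.map pvKeyB) : pvTs rows k ≠ [] := by
  obtain ⟨r, hr, hk⟩ := List.mem_map.mp h
  intro hnil
  have : r.headD "" ∈ pvTs rows k :=
    List.mem_filterMap.mpr ⟨r, hr, by simp [hk]⟩
  simp [hnil] at this

theorem pvTs_nil (rows : List (List String)) (k : String)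
    (h : k ∉ rows.map pvKeyB) : pvTs rows k = [] := by
  rw [pvTs, List.filterMap_eq_nil_iff]
  intro r hr
  have : pvKeyB r ≠ k := fun he => h (List.mem_map.mpr ⟨r, hr, he⟩)
  simp [this]

-- the dict A's loop builds, characterised: keyed by the distinct keys in first-occurrence
-- order, each key mapped to the join of its transcriptions
theorem pvFoldA_eq (rows : List (List String)) (hpre : ∀ r ∈ rows, r.length = 4) :
    rows.foldl pvStepA PySem.Dict.empty
      = PySem.Dict.mk ((PySem.Set.ofList (rows.map pvKeyB)).map
          (fun k => (k, PySem.Str.join "," (pvTs rows k)))) := by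
  induction rows using List.reverseRecOn with
  | nil => rfl
  | append_singleton rows r ih =>
    have hr : r.length = 4 := hpre r (by simp)
    have hrows : ∀ x ∈ rows, x.length = 4 := fun x hx => hpre x (by simp [hx])
    rcases r with _ | ⟨t, _ | ⟨c, _ | ⟨s, _ | ⟨e, rest⟩⟩⟩⟩
    · simp at hr
    · simp at hr
    · simp at hr
    · simp at hr
    cases rest with
    | cons x xs => simp at hr
    | nil =>
    rw [List.foldl_append, List.foldl_cons, List.foldl_nil, ih hrows]
    have hkey : pvKeyB [t, c, s, e] = c ++ "," ++ s ++ "," ++ e := rfl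
    set key := c ++ "," ++ s ++ "," ++ e with hk
    set dist := PySem.Set.ofList (rows.map pvKeyB) with hdist
    set f : String → String := fun k => PySem.Str.join "," (pvTs rows k) with hf
    have hmap : rows.map pvKeyB ++ [key] = (rows ++ [[t, c, s, e]]).map pvKeyB := by
      simp [hkey]
    have hdist' : PySem.Set.ofList ((rows ++ [[t, c, s, e]]).map pvKeyB)
        = PySem.Set.add dist key := by
      rw [← hmap, PySem.Set.ofList_append_singleton]
    simp only [pvStepA, ← hk, pvGet?_mkMap]
    by_cases hmem : key ∈ dist
    · -- key already present: in-place update of its entry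
      have hmemks : key ∈ rows.map pvKeyB := (PySem.Set.mem_ofList _ _).mp hmem
      have hadd : PySem.Set.add dist key = dist := by
        simp [PySem.Set.add, PySem.Set.contains, hmem]
      obtain ⟨a, ts, hts⟩ := List.exists_cons_of_ne_nil (pvTs_ne_nil rows key hmemks)
      have hcont : (PySem.Dict.mk (dist.map (fun k => (k, f k)))).contains key = true := by
        rw [PySem.Dict.contains_eq_isSome_get?, pvGet?_mkMap]; simp [hmem]
      rw [if_pos hmem]
      apply PySem.Dict.ext
      rw [PySem.Dict.items_insert_of_contains _ _ hcont, hdist', hadd]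
      show (dist.map (fun k => (k, f k))).map _ = _
      rw [List.map_map]
      refine List.map_congr_left (fun k hkmem => ?_)
      by_cases hkk : k = key
      · subst hkk
        simp only [Function.comp, BEq.rfl, if_pos]
        rw [pvTs_snoc, hkey]
        simp only [BEq.rfl, if_pos, hts, List.headD_cons]
        rw [List.cons_append, pvJoin_snoc]
      · have h1 : (k == key) = false := by simp [hkk]
        simp only [Function.comp, h1, Bool.false_eq_true, if_false]
        rw [pvTs_snoc, hkey]
        have h2 : (key == k) = false := by simp [Ne.symm hkk]
        simp [h2, hf]
    · -- fresh key: appended at the end with value = the single transcription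
      have hmemks : key ∉ rows.map pvKeyB := fun h => hmem ((PySem.Set.mem_ofList _ _).mpr h)
      have hadd : PySem.Set.add dist key = dist ++ [key] := by
        simp [PySem.Set.add, PySem.Set.contains, hmem]
      have hcont : (PySem.Dict.mk (dist.map (fun k => (k, f k)))).contains key = false := by
        rw [PySem.Dict.contains_eq_isSome_get?, pvGet?_mkMap]; simp [hmem]
      rw [if_neg hmem]
      apply PySem.Dict.ext
      rw [PySem.Dict.items_insert_of_not_contains _ _ hcont, hdist', hadd, List.map_append]
      congr 1
      · show (dist.map (fun k => (k, f k))) = _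
        refine (List.map_congr_left (fun k hkmem => ?_)).symm
        have hkk : k ≠ key := fun he => hmem (he ▸ hkmem)
        rw [pvTs_snoc, hkey]
        have h2 : (key == k) = false := by simp [Ne.symm hkk]
        simp [h2, hf]
      · rw [List.map_singleton, pvTs_snoc, pvTs_nil rows key hmemks, hkey]
        simp [pvJoin_singleton]

-- B's per-key scan over zip(table, keys) is pvTs
theorem pvZip_filterMap (rows : List (List String)) (k : String) :
    (rows.zip (rows.map pvKeyB)).filterMap
        (fun p => if p.2 == k then some (p.1.headD "") else none)
      = pvTs rows k := by
  induction rows with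
  | nil => rfl
  | cons r rest ih =>
    simp only [List.map_cons, List.zip_cons_cons, List.filterMap_cons, pvTs,
      List.filterMap_cons] at *
    split <;> simp_all

-- ===== VERDICT (by name: the statement is the Claim_ definition above) =====
theorem create_groupby_spec : Claim_equal_create_groupby := by
  intro table _ hpre
  unfold Pre_create_groupby at hpre
  unfold Spec_create_groupby create_groupby create_groupby_alt
  have hall : table.all (fun row => row.length == 4) = true := by
    simp only [List.all_eq_true, beq_iff_eq]; exact hpre
  rw [if_pos hall, pvFoldA_eq table hpre]
  simp only [PySem.List.dedup_eq_ofList]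
  refine List.map_congr_left (fun k _ => ?_)
  rw [pvZip_filterMap]
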